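-- pv_equiv track=rewrite | github.com/sagemath/sagetrac-mirror | src/sage/combinat/sequences.py | subsequence_by_indices
-- ===== SOURCE A (Python) =====
-- def subsequence_by_indices(sequence, indices):
--     r"""
--     Returns the subsequence of the given sequence determined by the
--     specified indices.
--
--     INPUT:
--
--     - ``sequence`` -- an iterable.
--
--     - ``indices`` -- an iterable of increasing non-negative integers.
--
--     OUTPUT:
--
--     An iterator.
--
--     EXAMPLES::
--
--         sage: from sage.combinat.sequences import subsequence_by_indices
--         sage: it = xsrange(10, 20)
--         sage: tuple(subsequence_by_indices(it, xsrange(0, 10, 2)))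
--         (10, 12, 14, 16, 18)
--
--     TESTS::
--
--         sage: it = xsrange(10, 12)
--         sage: tuple(subsequence_by_indices(it, xsrange(0, 10, 2)))
--         (10,)
--     """
--     it = enumerate(sequence)
--     for i in indices:
--         for n, s in it:
--             if n == i:
--                 yield s
--                 break
--         else:
--             break
-- ===== SOURCE B (Python) =====
-- def subsequence_by_indices(sequence, indices):
--     seq = list(sequence)
--     pos = 0
--     for i in indices:
--         if i < pos or i >= len(seq):
--             return
--         yield seq[i]
--         pos = i + 1
-- ===== Notes on version B (the rewrite author's own statement) =====
-- stated objective: alternative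
-- what changed: B materialises the sequence and yields seq[i] by direct random access guarded by a monotone cursor (stop when i < cursor or i >= len), instead of A's lockstep scanning of a shared enumerate iterator with nested for-else loops.
import Mathlib
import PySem

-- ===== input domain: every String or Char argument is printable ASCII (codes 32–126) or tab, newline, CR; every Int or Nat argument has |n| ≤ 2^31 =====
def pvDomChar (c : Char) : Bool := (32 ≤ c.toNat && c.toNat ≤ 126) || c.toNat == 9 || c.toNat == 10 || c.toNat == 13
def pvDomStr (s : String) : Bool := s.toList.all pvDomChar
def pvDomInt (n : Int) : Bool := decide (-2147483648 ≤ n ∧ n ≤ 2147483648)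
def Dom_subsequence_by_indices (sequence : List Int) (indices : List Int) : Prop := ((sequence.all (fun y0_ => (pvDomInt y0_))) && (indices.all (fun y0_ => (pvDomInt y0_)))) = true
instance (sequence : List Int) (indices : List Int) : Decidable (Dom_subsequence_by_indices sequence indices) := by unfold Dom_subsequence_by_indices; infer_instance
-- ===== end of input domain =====

-- B replaces A's lockstep scan of a shared enumerate iterator by direct random access
-- seq[i] guarded by a monotone cursor (stop when i < cursor or i >= len); alternative, same cost.

-- ===== PORT A =====
-- inner 'for n, s in it: if n == i: yield s; break / else: break' — returns the yielded
-- element and the rest of the shared iterator, or none when the iterator is exhausted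
def pvInnerA (it : List (Int × Int)) (i : Int) : Option (Int × List (Int × Int)) :=
  match it with
  | [] => none
  | (n, s) :: t => if n = i then some (s, t) else pvInnerA t i

-- outer 'for i in indices' loop
def pvOuterA (indices : List Int) (it : List (Int × Int)) : List Int :=
  match indices with
  | [] => []
  | i :: rest =>
    match pvInnerA it i with
    | none => []
    | some (s, it') => s :: pvOuterA rest it'

def subsequence_by_indices (sequence : List Int) (indices : List Int) : List Int :=
  pvOuterA indices (PySem.List.enumerate sequence 0)

-- ===== PORT B =====
-- 'for i in indices' with the cursor pos; seq[i] is in range whenever the guard passes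
def pvLoopB (seq : List Int) (pos : Int) (indices : List Int) : List Int :=
  match indices with
  | [] => []
  | i :: rest =>
    if i < pos ∨ (seq.length : Int) ≤ i then []          -- return
    else
      match PySem.List.pyGet? seq i with                  -- seq[i]
      | some s => s :: pvLoopB seq (i + 1) rest
      | none => []                                        -- unreachable: 0 ≤ pos ≤ i < len

def subsequence_by_indices_alt (sequence : List Int) (indices : List Int) : List Int :=
  pvLoopB sequence 0 indices

-- ===== PRECONDITION & SPEC =====
def Spec_subsequence_by_indices (sequence : List Int) (indices : List Int) (out : List Int) : Prop := out = subsequence_by_indices_alt sequence indices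
instance (sequence : List Int) (indices : List Int) (out : List Int) : Decidable (Spec_subsequence_by_indices sequence indices out) := by unfold Spec_subsequence_by_indices; infer_instance

-- ===== CLAIM (what is proved, stated in full; the proofs are below) =====
def Claim_equal_subsequence_by_indices : Prop := ∀ (sequence : List Int) (indices : List Int), Dom_subsequence_by_indices sequence indices → Spec_subsequence_by_indices sequence indices (subsequence_by_indices sequence indices)

-- ===== LEMMAS AND PROOFS =====
theorem pvInnerA_none (l : List Int) (k i : Int)
    (h : i < k ∨ k + (l.length : Int) ≤ i) :
    pvInnerA (PySem.List.enumerate l k) i = none := by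
  induction l generalizing k with
  | nil => simp [pvInnerA]
  | cons s t ih =>
    have hk : k ≠ i := by
      rcases h with h | h
      · omega
      · simp only [List.length_cons] at h; push_cast at h; omega
    simp only [PySem.List.enumerate_cons, pvInnerA, if_neg hk]
    apply ih
    rcases h with h | h
    · left; omega
    · right; simp only [List.length_cons] at h; push_cast at h ⊢; omega

theorem pvInnerA_some (l : List Int) (k i : Int) (hk : k ≤ i)
    (h : (i - k).toNat < l.length) :
    pvInnerA (PySem.List.enumerate l k) i =
      some (l[(i - k).toNat], PySem.List.enumerate (l.drop ((i - k).toNat + 1)) (i + 1)) := by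
  induction l generalizing k with
  | nil => simp at h
  | cons s t ih =>
    by_cases hki : k = i
    · simp [PySem.List.enumerate_cons, pvInnerA, hki]
    · have hlt : k < i := lt_of_le_of_ne hk hki
      have hstep : (i - k).toNat = (i - (k + 1)).toNat + 1 := by omega
      simp only [PySem.List.enumerate_cons, pvInnerA, if_neg hki]
      rw [ih (k + 1) (by omega) (by simp only [List.length_cons] at h; omega)]
      simp [hstep]

theorem pvOuterA_eq_pvLoopB (seq : List Int) (indices : List Int) :
    ∀ pos : Nat, pos ≤ seq.length →
      pvOuterA indices (PySem.List.enumerate (seq.drop pos) (pos : Int)) =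
        pvLoopB seq (pos : Int) indices := by
  induction indices with
  | nil => intro pos _; simp [pvOuterA, pvLoopB]
  | cons i rest ih =>
    intro pos hpos
    by_cases hc : i < (pos : Int) ∨ (seq.length : Int) ≤ i
    · have hnone : pvInnerA (PySem.List.enumerate (seq.drop pos) (pos : Int)) i = none := by
        apply pvInnerA_none
        rcases hc with h | h
        · left; exact h
        · right; simp only [List.length_drop]; omega
      simp [pvOuterA, pvLoopB, hnone, hc]
    · push Not at hc
      obtain ⟨h1, h2⟩ := hc
      have hlen : (i - (pos : Int)).toNat < (seq.drop pos).length := by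
        simp only [List.length_drop]; omega
      have hsome := pvInnerA_some (seq.drop pos) (pos : Int) i h1 hlen
      have hidx : pos + (i - (pos : Int)).toNat = i.toNat := by omega
      have hget : PySem.List.pyGet? seq i = some seq[i.toNat] := by
        apply PySem.List.pyGet?_eq_some_getElem <;> omega
      have hd : (seq.drop pos).drop ((i - (pos : Int)).toNat + 1) = seq.drop (i.toNat + 1) := by
        rw [List.drop_drop]; congr 1; omega
      have hi1 : i + 1 = ((i.toNat + 1 : Nat) : Int) := by omega
      simp only [pvOuterA, hsome, pvLoopB, if_neg (by omega : ¬(i < (pos : Int) ∨ (seq.length : Int) ≤ i)), hget]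
      have hgetel : (seq.drop pos)[(i - (pos : Int)).toNat]'hlen = seq[i.toNat]'(by omega) := by
        rw [List.getElem_drop]; congr 1
      rw [hgetel, hd, hi1, ih (i.toNat + 1) (by omega)]

-- ===== VERDICT (by name: the statement is the Claim_ definition above) =====
theorem subsequence_by_indices_spec : Claim_equal_subsequence_by_indices := by
  intro sequence indices _
  unfold Spec_subsequence_by_indices subsequence_by_indices subsequence_by_indices_alt
  have := pvOuterA_eq_pvLoopB sequence indices 0 (Nat.zero_le _)
  simpa using this
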